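-- pv_equiv track=rewrite | github.com/xbdxwyh/ChunQiuTR | src/ChunQiuDataset.py | normalize_sort_keys_and_time_ids
-- ===== SOURCE A (Python) =====
-- from typing import Dict, List, Tuple, Optional
--
-- def normalize_sort_keys_and_time_ids(
--     sort_keys: List[Tuple[int, int, int]],
--     sort_key2_time_id: Dict[Tuple[int, int, int], int],
--     fallback_sk: Optional[Tuple[int, int, int]] = None,
-- ) -> Tuple[List[Tuple[int, int, int]], List[int]]:
--     """
--     将 sort_keys 过滤为 corpus 中存在的月份，并按 time_id 升序排序。
--     返回 (sorted_sort_keys, sorted_time_ids)。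
--
--     - 如果过滤后为空且提供了 fallback_sk，则用 fallback_sk 补一个。
--     - 保证返回的列表长度一致，且与排序后的 time_id 对齐。
--     """
--     valid_pairs: List[Tuple[int, Tuple[int, int, int]]] = []
--     for sk in sort_keys:
--         sk = tuple(sk)
--         tid = sort_key2_time_id.get(sk, None)
--         if tid is None:
--             continue
--         valid_pairs.append((tid, sk))
--
--     if not valid_pairs and fallback_sk is not None:
--         fb_tid = sort_key2_time_id.get(tuple(fallback_sk), None)
--         if fb_tid is not None:
--             valid_pairs = [(fb_tid, tuple(fallback_sk))]
--
--     if not valid_pairs: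
--         return [], []
--
--     valid_pairs.sort(key=lambda x: x[0])  # sort by time_id
--     sorted_time_ids = [tid for tid, _ in valid_pairs]
--     sorted_sort_keys = [sk for _, sk in valid_pairs]
--     return sorted_sort_keys, sorted_time_ids
-- ===== SOURCE B (Python) =====
-- def normalize_sort_keys_and_time_ids(sort_keys, sort_key2_time_id, fallback_sk=None):
--     """One-pass online insertion sort: maintain two parallel lists (time ids
--     and keys) kept sorted by time id while scanning, inserting each valid key
--     after any equal ids so the original order is preserved on ties."""
--     tids = []
--     keys = []
--     for sk in sort_keys:
--         sk = tuple(sk)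
--         tid = sort_key2_time_id.get(sk)
--         if tid is None:
--             continue
--         i = 0
--         while i < len(tids) and tids[i] <= tid:
--             i += 1
--         tids.insert(i, tid)
--         keys.insert(i, sk)
--     if not tids and fallback_sk is not None:
--         fb = tuple(fallback_sk)
--         tid = sort_key2_time_id.get(fb)
--         if tid is not None:
--             return [fb], [tid]
--     return keys, tids
-- ===== Notes on version B (the rewrite author's own statement) =====
-- stated objective: alternative
-- what changed: B replaces A's filter-then-library-sort over a zipped (time_id, key) pair list with a single online pass that insertion-sorts each valid key into two parallel lists (ids and keys) as it scans, with no sort call and no pair list.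
import Mathlib
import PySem

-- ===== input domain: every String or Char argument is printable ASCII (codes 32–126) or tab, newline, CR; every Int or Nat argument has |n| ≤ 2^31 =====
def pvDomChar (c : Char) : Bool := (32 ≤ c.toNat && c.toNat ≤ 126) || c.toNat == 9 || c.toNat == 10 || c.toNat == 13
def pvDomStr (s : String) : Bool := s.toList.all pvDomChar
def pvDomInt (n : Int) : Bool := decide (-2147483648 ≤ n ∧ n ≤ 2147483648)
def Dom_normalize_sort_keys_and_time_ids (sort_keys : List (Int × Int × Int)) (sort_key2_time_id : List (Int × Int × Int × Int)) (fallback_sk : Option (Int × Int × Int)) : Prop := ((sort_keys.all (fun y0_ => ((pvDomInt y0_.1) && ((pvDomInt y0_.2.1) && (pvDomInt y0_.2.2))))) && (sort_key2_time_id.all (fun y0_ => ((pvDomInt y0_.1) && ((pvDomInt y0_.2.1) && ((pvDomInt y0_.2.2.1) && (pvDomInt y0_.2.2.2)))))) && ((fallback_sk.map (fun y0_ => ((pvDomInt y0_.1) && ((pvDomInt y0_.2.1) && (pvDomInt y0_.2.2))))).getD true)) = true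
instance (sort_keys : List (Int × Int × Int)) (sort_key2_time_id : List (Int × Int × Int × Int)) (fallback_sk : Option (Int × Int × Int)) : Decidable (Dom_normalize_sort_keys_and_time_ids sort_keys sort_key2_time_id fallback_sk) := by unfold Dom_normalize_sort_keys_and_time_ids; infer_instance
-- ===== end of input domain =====

-- B replaces A's filter-then-sort over a zipped pair list by a single online
-- insertion-sorting pass over two parallel lists (objective: alternative).

-- ===== PORT A =====
-- shared dict primitive: first-match lookup of a (k1,k2,k3) key in the association list
def pvGetTid (d : List (Int × Int × Int × Int)) (sk : Int × Int × Int) : Option Int :=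
  match d with
  | [] => none
  | e :: rest => if (e.1, e.2.1, e.2.2.1) = sk then some e.2.2.2 else pvGetTid rest sk

def normalize_sort_keys_and_time_ids (sort_keys : List (Int × Int × Int)) (sort_key2_time_id : List (Int × Int × Int × Int)) (fallback_sk : Option (Int × Int × Int)) : (List (Int × Int × Int)) × List Int :=
  let valid_pairs : List (Int × (Int × Int × Int)) := sort_keys.foldl (fun acc sk =>
      match pvGetTid sort_key2_time_id sk with
      | none => acc
      | some tid => acc ++ [(tid, sk)]) []
  let valid_pairs := if valid_pairs.isEmpty then
      match fallback_sk with
      | none => valid_pairs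
      | some fb =>
        match pvGetTid sort_key2_time_id fb with
        | none => valid_pairs
        | some fb_tid => [(fb_tid, fb)]
    else valid_pairs
  if valid_pairs.isEmpty then ([], [])
  else
    let sp := PySem.List.sorted valid_pairs (fun x => x.1) false
    (sp.map (fun x => x.2), sp.map (fun x => x.1))

-- ===== PORT B =====
-- the while-loop + two list.insert calls of Source B: walk past every id ≤ tid, insert in both lists
def pvIns (tid : Int) (sk : Int × Int × Int) : List Int → List (Int × Int × Int) → List Int × List (Int × Int × Int)
  | t :: ts, k :: ks =>
    if t ≤ tid then
      let r := pvIns tid sk ts ks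
      (t :: r.1, k :: r.2)
    else (tid :: t :: ts, sk :: k :: ks)
  | _, _ => ([tid], [sk])

def normalize_sort_keys_and_time_ids_alt (sort_keys : List (Int × Int × Int)) (sort_key2_time_id : List (Int × Int × Int × Int)) (fallback_sk : Option (Int × Int × Int)) : (List (Int × Int × Int)) × List Int :=
  let st : List Int × List (Int × Int × Int) := sort_keys.foldl (fun st sk =>
      match pvGetTid sort_key2_time_id sk with
      | none => st
      | some tid => pvIns tid sk st.1 st.2) ([], [])
  if st.1.isEmpty then
    match fallback_sk with
    | some fb =>
      match pvGetTid sort_key2_time_id fb with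
      | some tid => ([fb], [tid])
      | none => (st.2, st.1)
    | none => (st.2, st.1)
  else (st.2, st.1)

-- ===== PRECONDITION & SPEC =====
def Spec_normalize_sort_keys_and_time_ids (sort_keys : List (Int × Int × Int)) (sort_key2_time_id : List (Int × Int × Int × Int)) (fallback_sk : Option (Int × Int × Int)) (out : (List (Int × Int × Int)) × List Int) : Prop := out = normalize_sort_keys_and_time_ids_alt sort_keys sort_key2_time_id fallback_sk
instance (sort_keys : List (Int × Int × Int)) (sort_key2_time_id : List (Int × Int × Int × Int)) (fallback_sk : Option (Int × Int × Int)) (out : (List (Int × Int × Int)) × List Int) : Decidable (Spec_normalize_sort_keys_and_time_ids sort_keys sort_key2_time_id fallback_sk out) := by unfold Spec_normalize_sort_keys_and_time_ids; infer_instance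

-- ===== CLAIM (what is proved, stated in full; the proofs are below) =====
def Claim_equal_normalize_sort_keys_and_time_ids : Prop := ∀ (sort_keys : List (Int × Int × Int)) (sort_key2_time_id : List (Int × Int × Int × Int)) (fallback_sk : Option (Int × Int × Int)), Dom_normalize_sort_keys_and_time_ids sort_keys sort_key2_time_id fallback_sk → Spec_normalize_sort_keys_and_time_ids sort_keys sort_key2_time_id fallback_sk (normalize_sort_keys_and_time_ids sort_keys sort_key2_time_id fallback_sk)

-- ===== LEMMAS AND PROOFS =====

-- A's zipped pair for a key (the tid is total here; used only where lookup succeeds)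
def pvPair (d : List (Int × Int × Int × Int)) (sk : Int × Int × Int) : Int × (Int × Int × Int) :=
  ((pvGetTid d sk).getD 0, sk)

-- A's pair-accumulating loop is the pair image of the filtered key list
theorem pv_foldl_pairs (d : List (Int × Int × Int × Int)) (xs : List (Int × Int × Int)) :
    ∀ acc, xs.foldl (fun acc sk =>
        match pvGetTid d sk with
        | none => acc
        | some tid => acc ++ [(tid, sk)]) acc
      = acc ++ (xs.filter (fun sk => (pvGetTid d sk).isSome)).map (pvPair d) := by
  induction xs with
  | nil => intro acc; simp
  | cons x xs ih =>
    intro acc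
    cases h : pvGetTid d x with
    | none => simp [List.foldl_cons, h, ih]
    | some tid => simp [List.foldl_cons, h, ih, pvPair]

-- B's parallel-list insertion is insertBy on the zipped pair list, component-wise
theorem pv_pvIns_unzip (tid : Int) (sk : Int × Int × Int)
    (ps : List (Int × (Int × Int × Int))) :
    pvIns tid sk (ps.map Prod.fst) (ps.map Prod.snd)
      = ((PySem.List.insertBy (fun a b => decide (a.1 < b.1)) (tid, sk) ps).map Prod.fst,
         (PySem.List.insertBy (fun a b => decide (a.1 < b.1)) (tid, sk) ps).map Prod.snd) := by
  induction ps with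
  | nil => simp [pvIns, PySem.List.insertBy]
  | cons p ps ih =>
    simp only [List.map_cons, pvIns, PySem.List.insertBy]
    by_cases h : p.1 ≤ tid
    · have h' : ¬ tid < p.1 := not_lt.2 h
      simp [h, h', ih]
    · have h' : tid < p.1 := lt_of_not_ge h
      simp [h, h']

-- B's whole scan computes the components of A's insertion-sort fold over the filtered pairs
theorem pv_fold_unzip (d : List (Int × Int × Int × Int)) (xs : List (Int × Int × Int)) :
    ∀ ps : List (Int × (Int × Int × Int)),
      xs.foldl (fun st sk =>
          match pvGetTid d sk with
          | none => st
          | some tid => pvIns tid sk st.1 st.2) (ps.map Prod.fst, ps.map Prod.snd)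
      = (((xs.filter (fun sk => (pvGetTid d sk).isSome)).map (pvPair d)).foldl
            (fun acc p => PySem.List.insertBy (fun a b => decide (a.1 < b.1)) p acc) ps
            |>.map Prod.fst,
         ((xs.filter (fun sk => (pvGetTid d sk).isSome)).map (pvPair d)).foldl
            (fun acc p => PySem.List.insertBy (fun a b => decide (a.1 < b.1)) p acc) ps
            |>.map Prod.snd) := by
  induction xs with
  | nil => intro ps; simp
  | cons x xs ih =>
    intro ps
    cases h : pvGetTid d x with
    | none => simp [List.foldl_cons, h, ih]
    | some tid =>
      have hp : pvPair d x = (tid, x) := by simp [pvPair, h]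
      simp only [List.foldl_cons, h, List.filter_cons, Option.isSome_some, List.map_cons,
        if_true]
      rw [pv_pvIns_unzip, ih, hp]

theorem pv_insertBy_length (p : Int × (Int × Int × Int)) (ps : List (Int × (Int × Int × Int))) :
    (PySem.List.insertBy (fun a b => decide (a.1 < b.1)) p ps).length = ps.length + 1 := by
  induction ps with
  | nil => simp [PySem.List.insertBy]
  | cons q ps ih =>
    simp only [PySem.List.insertBy]
    split <;> simp [ih]

theorem pv_foldl_insertBy_length (l : List (Int × (Int × Int × Int))) :
    ∀ ps : List (Int × (Int × Int × Int)),
      (l.foldl (fun acc p => PySem.List.insertBy (fun a b => decide (a.1 < b.1)) p acc) ps).length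
        = ps.length + l.length := by
  induction l with
  | nil => intro ps; simp
  | cons p l ih => intro ps; simp [List.foldl_cons, ih, pv_insertBy_length]; omega

-- ===== VERDICT (by name: the statement is the Claim_ definition above) =====
theorem normalize_sort_keys_and_time_ids_spec : Claim_equal_normalize_sort_keys_and_time_ids := by
  intro sort_keys d fb _
  unfold Spec_normalize_sort_keys_and_time_ids
  unfold normalize_sort_keys_and_time_ids normalize_sort_keys_and_time_ids_alt
  simp only [pv_foldl_pairs d sort_keys [], List.nil_append]
  have hfold := pv_fold_unzip d sort_keys []
  simp only [List.map_nil] at hfold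
  rw [hfold]
  set vp := (sort_keys.filter (fun sk => (pvGetTid d sk).isSome)).map (pvPair d) with hvp
  set q := vp.foldl (fun acc p => PySem.List.insertBy (fun a b => decide (a.1 < b.1)) p acc) [] with hq
  have hsorted : PySem.List.sorted vp (fun x => x.1) false = q := by
    rw [PySem.List.sorted_eq_foldl_insertBy]
  have hlen : q.length = vp.length := by
    rw [hq, pv_foldl_insertBy_length]; simp
  cases hve : vp.isEmpty
  · -- nonempty: both return the sorted components, no fallback consulted
    have hvne : vp ≠ [] := by simpa [List.isEmpty_iff] using hve
    have hqne' : q ≠ [] := by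
      intro h0
      rw [h0] at hlen
      exact hvne (List.length_eq_zero_iff.mp hlen.symm)
    have hqne : (q.map Prod.fst).isEmpty = false := by
      simp [hqne']
    simp [hve, hqne, hsorted]
  · -- empty: both consult the fallback
    have hnil : vp = [] := by simpa [List.isEmpty_iff] using hve
    have hqnil : q = [] := by
      have := hlen; rw [hnil] at this
      exact List.length_eq_zero_iff.mp (by simpa using this)
    simp only [hnil, hqnil, List.map_nil, List.isEmpty_nil, if_true]
    cases fb with
    | none => simp
    | some f =>
      cases hf : pvGetTid d f with
      | none => simp [hf]
      | some t => simp [hf, PySem.List.sorted, PySem.List.insertBy]
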